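-- pv_equiv track=rewrite | github.com/colinhiggs/pyramid-jsonapi | pyramid_jsonapi/http_query.py | longest_includes
-- ===== SOURCE A (Python) =====
-- def include_chain(include):
--     chain = []
--     names = include.split('.')
--     for i in range(len(names)):
--         chain.append(tuple(names[:i + 1]))
--     return chain
--
-- def longest_includes(includes):
--     seen = set()
--     longest = set()
--     for inc in includes:
--         inc_chain = include_chain(inc)
--         if inc_chain[-1] in seen:
--             continue
--         seen |= set(inc_chain)
--         longest -= set(inc_chain[:-1])
--         longest.add(inc_chain[-1])
--     return longest
-- ===== SOURCE B (Python) =====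
-- def longest_includes(includes):
--     fulls = {tuple(inc.split('.')) for inc in includes}
--     prefixes = {names[:i] for names in fulls for i in range(1, len(names))}
--     return fulls - prefixes
-- ===== Notes on version B (the rewrite author's own statement) =====
-- stated objective: simpler
-- what changed: B replaces A's stateful loop (seen-set, early continue, incremental removal of prefixes from the running result) by two set comprehensions - the set of full split tuples and the set of all proper prefixes - and a single set difference.
import Mathlib
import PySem

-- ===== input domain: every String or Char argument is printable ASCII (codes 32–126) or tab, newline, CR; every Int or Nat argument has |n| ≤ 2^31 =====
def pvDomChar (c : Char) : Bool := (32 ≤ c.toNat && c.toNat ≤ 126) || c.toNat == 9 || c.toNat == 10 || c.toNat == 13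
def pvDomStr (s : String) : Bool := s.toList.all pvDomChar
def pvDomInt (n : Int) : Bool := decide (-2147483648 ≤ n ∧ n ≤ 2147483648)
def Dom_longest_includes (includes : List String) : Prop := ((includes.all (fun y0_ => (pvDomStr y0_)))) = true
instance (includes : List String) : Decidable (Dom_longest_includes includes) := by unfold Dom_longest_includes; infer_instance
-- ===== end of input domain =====

-- B replaces A's stateful loop (seen-set, early continue, incremental prefix removal) by two set
-- comprehensions (full tuples; all proper prefixes) and one set difference; objective: simpler.

-- ===== PORT A =====
-- inc.split('.'): the separator is the nonempty literal ".", so split? is always `some`; getD only makes it total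
def pySplitDot (s : String) : List String := (PySem.Str.split? s ".").getD []

def include_chain (include_ : String) : List (List String) :=
  let names := pySplitDot include_
  (PySem.List.pyRange 0 (names.length : Int) 1).foldl
    (fun chain i => chain ++ [PySem.List.slice names none (some (i + 1))]) []

def longest_includes (includes : List String) : List (List String) :=
  (includes.foldl
    (fun (st : PySem.Set (List String) × PySem.Set (List String)) inc =>
      let inc_chain := include_chain inc
      if PySem.Set.contains st.1 (PySem.List.pyGetD inc_chain (-1) []) then st
      else
        (PySem.Set.union st.1 inc_chain,
         PySem.Set.add
           (PySem.Set.diff st.2 (PySem.Set.ofList (PySem.List.slice inc_chain none (some (-1)))))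
           (PySem.List.pyGetD inc_chain (-1) [])))
    (PySem.Set.empty, PySem.Set.empty)).2

-- ===== PORT B =====
def longest_includes_alt (includes : List String) : List (List String) :=
  let fulls : PySem.Set (List String) := PySem.Set.ofList (includes.map (fun inc => pySplitDot inc))
  let prefixes : PySem.Set (List String) :=
    PySem.Set.ofList (fulls.flatMap (fun names =>
      (PySem.List.pyRange 1 (names.length : Int) 1).map (fun i => PySem.List.slice names none (some i))))
  PySem.Set.diff fulls prefixes

-- ===== PRECONDITION & SPEC =====
def Spec_longest_includes (includes : List String) (out : List (List String)) : Prop := out = longest_includes_alt includes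
instance (includes : List String) (out : List (List String)) : Decidable (Spec_longest_includes includes out) := by unfold Spec_longest_includes; infer_instance

-- ===== CLAIM (what is proved, stated in full; the proofs are below) =====
def Claim_equal_longest_includes : Prop := ∀ (includes : List String), Dom_longest_includes includes → Spec_longest_includes includes (longest_includes includes)

-- ===== LEMMAS AND PROOFS =====

-- the first n nonempty prefixes of `names` (the takes of lengths 1..n)
def pvTakes (names : List String) (n : Nat) : List (List String) :=
  (List.range n).map (fun k => names.take (k + 1))

-- all nonempty prefixes of inc's split / its proper prefixes
def pvChain (inc : String) : List (List String) := pvTakes (pySplitDot inc) (pySplitDot inc).length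
def pvProps (inc : String) : List (List String) := pvTakes (pySplitDot inc) ((pySplitDot inc).length - 1)

-- A's loop body, named for the proofs (definitionally the lambda in `longest_includes`)
def pvStep (st : PySem.Set (List String) × PySem.Set (List String)) (inc : String) :
    PySem.Set (List String) × PySem.Set (List String) :=
  if PySem.Set.contains st.1 (PySem.List.pyGetD (include_chain inc) (-1) []) then st
  else
    (PySem.Set.union st.1 (include_chain inc),
     PySem.Set.add
       (PySem.Set.diff st.2 (PySem.Set.ofList (PySem.List.slice (include_chain inc) none (some (-1)))))
       (PySem.List.pyGetD (include_chain inc) (-1) []))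

theorem longest_includes_eq_foldl (includes : List String) :
    longest_includes includes
      = (includes.foldl pvStep (PySem.Set.empty, PySem.Set.empty)).2 := rfl

theorem pySplitDot_eq (s : String) :
    pySplitDot s = (PySem.Chars.splitOn s.toList ['.']).map String.ofList := by
  have h : ".".toList = ['.'] := rfl
  simp [pySplitDot, PySem.Str.split?, h, PySem.Chars.split?]

theorem splitOn_go_ne_nil (sep : List Char) (fuel : Nat) (l cur : List Char) (acc : List (List Char)) :
    PySem.Chars.splitOn.go sep fuel l cur acc ≠ [] := by
  induction fuel generalizing l cur acc with
  | zero => simp [PySem.Chars.splitOn.go]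
  | succ fuel ih =>
    cases l with
    | nil => simp [PySem.Chars.splitOn.go]
    | cons c rest =>
      rw [PySem.Chars.splitOn.go]
      split
      · exact ih _ _ _
      · exact ih _ _ _

theorem pySplitDot_ne_nil (s : String) : pySplitDot s ≠ [] := by
  rw [pySplitDot_eq]
  intro h
  exact splitOn_go_ne_nil ['.'] _ s.toList [] [] (by simpa [PySem.Chars.splitOn] using h)

theorem include_chain_eq (inc : String) :
    include_chain inc = pvTakes (pySplitDot inc) (pySplitDot inc).length := by
  show (PySem.List.pyRange 0 ((pySplitDot inc).length : Int) 1).foldl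
      (fun chain i => chain ++ [PySem.List.slice (pySplitDot inc) none (some (i + 1))]) [] = _
  unfold pvTakes
  rw [PySem.List.pyRange_one, PySem.List.foldl_append_singleton_eq_map]
  simp only [List.map_map, List.nil_append, Int.sub_zero, Int.toNat_natCast]
  apply List.map_congr_left
  intro k _
  simp only [Function.comp]
  rw [show ((0:Int) + (k:Int) + 1) = ((k+1 : Nat) : Int) by push_cast; ring,
      PySem.List.slice_to _ (by positivity)]
  simp

theorem pvTakes_concat {names : List String} (h : names ≠ []) :
    pvTakes names names.length = pvTakes names (names.length - 1) ++ [names] := by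
  obtain ⟨m, hm⟩ : ∃ m, names.length = m + 1 :=
    ⟨names.length - 1, by cases names <;> simp_all⟩
  rw [hm]
  simp only [pvTakes, Nat.add_sub_cancel, List.range_succ, List.map_append, List.map_cons,
    List.map_nil]
  rw [show names.take (m + 1) = names from hm ▸ List.take_length]

theorem include_chain_concat (inc : String) :
    include_chain inc = pvProps inc ++ [pySplitDot inc] := by
  rw [include_chain_eq, pvTakes_concat (pySplitDot_ne_nil inc)]; rfl

theorem pvStep_eq (st : PySem.Set (List String) × PySem.Set (List String)) (inc : String) :
    pvStep st inc =
      if PySem.Set.contains st.1 (pySplitDot inc) then st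
      else
        (PySem.Set.union st.1 (pvProps inc ++ [pySplitDot inc]),
         PySem.Set.add
           (PySem.Set.diff st.2 (PySem.Set.ofList (pvProps inc)))
           (pySplitDot inc)) := by
  unfold pvStep
  rw [include_chain_concat inc, PySem.List.pyGetD_neg_one_append_singleton,
      PySem.List.slice_to_neg_one, List.dropLast_concat]

theorem mem_pvTakes {names : List String} {n : Nat} {x : List String} :
    x ∈ pvTakes names n ↔ ∃ k, k < n ∧ x = names.take (k + 1) := by
  simp [pvTakes, List.mem_map, List.mem_range, eq_comm]

theorem take_of_take {l y : List String} {k j : Nat} (hy : y = l.take (k + 1))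
    (hj : j < y.length) : y.take (j + 1) = l.take (j + 1) := by
  subst hy
  rw [List.take_take]
  congr 1
  simp only [List.length_take] at hj
  omega

-- a take of a chain element is a chain element
theorem take_mem_chain {inc : String} {y : List String} {j : Nat}
    (hy : y ∈ pvChain inc) (hj : j < y.length) : y.take (j + 1) ∈ pvChain inc := by
  rw [pvChain, mem_pvTakes] at hy ⊢
  obtain ⟨k, hk, hy⟩ := hy
  refine ⟨j, ?_, take_of_take hy hj⟩
  have := hy ▸ hj
  simp only [List.length_take] at this
  omega

-- a proper take of a chain element is a proper prefix
theorem take_mem_props {inc : String} {y : List String} {j : Nat}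
    (hy : y ∈ pvChain inc) (hj : j + 1 < y.length) : y.take (j + 1) ∈ pvProps inc := by
  rw [pvChain, mem_pvTakes] at hy
  rw [pvProps, mem_pvTakes]
  obtain ⟨k, hk, hy⟩ := hy
  refine ⟨j, ?_, take_of_take hy (by omega)⟩
  have := hy ▸ hj
  simp only [List.length_take] at this
  omega

theorem full_mem_chain (inc : String) : pySplitDot inc ∈ pvChain inc := by
  rw [pvChain, pvTakes_concat (pySplitDot_ne_nil inc)]
  simp

theorem props_subset_chain {inc : String} {x : List String} (h : x ∈ pvProps inc) :
    x ∈ pvChain inc := by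
  rw [pvChain, pvTakes_concat (pySplitDot_ne_nil inc)]
  simp [pvProps] at h ⊢
  exact Or.inl h

theorem mem_props_length {inc : String} {x : List String} (h : x ∈ pvProps inc) :
    x.length < (pySplitDot inc).length := by
  rw [pvProps, mem_pvTakes] at h
  obtain ⟨k, hk, rfl⟩ := h
  simp only [List.length_take]
  omega

theorem full_not_mem_props (inc : String) : pySplitDot inc ∉ pvProps inc := by
  intro h
  exact absurd (mem_props_length h) (lt_irrefl _)

-- chain elements split into the full split and the proper prefixes
theorem chain_cases {inc : String} {x : List String} (h : x ∈ pvChain inc) :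
    x = pySplitDot inc ∨ x ∈ pvProps inc := by
  rw [pvChain, pvTakes_concat (pySplitDot_ne_nil inc)] at h
  rcases List.mem_append.mp h with h | h
  · exact Or.inr h
  · exact Or.inl (by simpa using h)

-- the loop invariant of A's fold
theorem pvInv (pre : List String) :
    (∀ x, x ∈ (pre.foldl pvStep (PySem.Set.empty, PySem.Set.empty)).1
        ↔ ∃ inc ∈ pre, x ∈ pvChain inc) ∧
    (pre.foldl pvStep (PySem.Set.empty, PySem.Set.empty)).2
      = (PySem.Set.ofList (pre.map pySplitDot)).filter
          (fun x => !((pre.flatMap pvProps).contains x)) := by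
  induction pre using List.reverseRecOn with
  | nil =>
    constructor
    · intro x; simp [PySem.Set.empty]
    · rfl
  | append_singleton pre inc ih =>
    obtain ⟨ihs, ihl⟩ := ih
    rw [List.foldl_append, List.foldl_cons, List.foldl_nil, pvStep_eq]
    by_cases hmem : pySplitDot inc ∈ (pre.foldl pvStep (PySem.Set.empty, PySem.Set.empty)).1
    · rw [if_pos ((PySem.Set.contains_iff _ _).mpr hmem)]
      obtain ⟨inc₀, h0, hch⟩ := (ihs _).mp hmem
      have hsub : ∀ x ∈ pvChain inc, x ∈ pvChain inc₀ := by
        intro x hx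
        rw [pvChain, mem_pvTakes] at hx
        obtain ⟨k, hk, rfl⟩ := hx
        exact take_mem_chain hch hk
      have hsubp : ∀ x ∈ pvProps inc, x ∈ pvProps inc₀ := by
        intro x hx
        rw [pvProps, mem_pvTakes] at hx
        obtain ⟨k, hk, rfl⟩ := hx
        exact take_mem_props hch (by omega)
      constructor
      · intro x
        rw [ihs x]
        constructor
        · rintro ⟨i', hi', hx⟩; exact ⟨i', List.mem_append_left _ hi', hx⟩
        · rintro ⟨i', hi', hx⟩
          rcases List.mem_append.mp hi' with h | h
          · exact ⟨i', h, hx⟩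
          · simp only [List.mem_singleton] at h; subst h
            exact ⟨inc₀, h0, hsub _ hx⟩
      · rw [ihl, List.map_append, List.map_cons, List.map_nil, PySem.Set.ofList_append_singleton]
        have hcond : ∀ x, ((pre ++ [inc]).flatMap pvProps).contains x
            = (pre.flatMap pvProps).contains x := by
          intro x
          rw [Bool.eq_iff_iff, List.contains_iff_mem, List.contains_iff_mem, List.flatMap_append]
          simp only [List.mem_append, List.flatMap_cons, List.flatMap_nil, List.append_nil]
          constructor
          · rintro (h | h)
            · exact h
            · exact List.mem_flatMap.mpr ⟨inc₀, h0, hsubp _ h⟩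
          · exact Or.inl
        by_cases hdup : pySplitDot inc ∈ pre.map pySplitDot
        · rw [PySem.Set.add_of_mem ((PySem.Set.mem_ofList _ _).mpr hdup)]
          apply List.filter_congr
          intro x _
          rw [hcond x]
        · have hfp : pySplitDot inc ∈ pvProps inc₀ := by
            rcases chain_cases hch with h | h
            · exact absurd (h ▸ List.mem_map_of_mem h0 (f := pySplitDot)) hdup
            · exact h
          rw [PySem.Set.add_of_not_mem (fun hc => hdup ((PySem.Set.mem_ofList _ _).mp hc)),
              List.filter_append]
          have hdrop : List.filter (fun x => !((pre ++ [inc]).flatMap pvProps).contains x)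
              [pySplitDot inc] = [] := by
            have hin : ((pre ++ [inc]).flatMap pvProps).contains (pySplitDot inc) = true :=
              List.contains_iff_mem.mpr
                (List.mem_flatMap.mpr ⟨inc₀, List.mem_append_left _ h0, hfp⟩)
            simp only [List.filter_cons, List.filter_nil, hin, Bool.not_true,
              Bool.false_eq_true, if_false]
          rw [hdrop, List.append_nil]
          apply List.filter_congr
          intro x _
          rw [hcond x]
    · rw [if_neg (fun hc => hmem ((PySem.Set.contains_iff _ _).mp hc))]
      have hnotfull : pySplitDot inc ∉ pre.map pySplitDot := by
        intro h
        obtain ⟨inc₀, h0, he⟩ := List.mem_map.mp h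
        exact hmem ((ihs _).mpr ⟨inc₀, h0, he ▸ full_mem_chain inc₀⟩)
      have hnotprops : pySplitDot inc ∉ pre.flatMap pvProps := by
        intro h
        obtain ⟨inc₀, h0, hp⟩ := List.mem_flatMap.mp h
        exact hmem ((ihs _).mpr ⟨inc₀, h0, props_subset_chain hp⟩)
      constructor
      · intro x
        rw [show ((PySem.Set.union (pre.foldl pvStep (PySem.Set.empty, PySem.Set.empty)).1
              (pvProps inc ++ [pySplitDot inc]),
            PySem.Set.add
              (PySem.Set.diff (pre.foldl pvStep (PySem.Set.empty, PySem.Set.empty)).2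
                (PySem.Set.ofList (pvProps inc)))
              (pySplitDot inc)).1)
          = PySem.Set.union (pre.foldl pvStep (PySem.Set.empty, PySem.Set.empty)).1
              (pvProps inc ++ [pySplitDot inc]) from rfl]
        rw [PySem.Set.mem_union, ihs x]
        constructor
        · rintro (⟨i', hi', hx⟩ | hx)
          · exact ⟨i', List.mem_append_left _ hi', hx⟩
          · refine ⟨inc, List.mem_append_right _ (by simp), ?_⟩
            rwa [pvChain, pvTakes_concat (pySplitDot_ne_nil inc)]
        · rintro ⟨i', hi', hx⟩
          rcases List.mem_append.mp hi' with h | h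
          · exact Or.inl ⟨i', h, hx⟩
          · simp only [List.mem_singleton] at h
            rw [h] at hx
            right
            rwa [pvChain, pvTakes_concat (pySplitDot_ne_nil inc)] at hx
      · show PySem.Set.add
            (PySem.Set.diff (pre.foldl pvStep (PySem.Set.empty, PySem.Set.empty)).2
              (PySem.Set.ofList (pvProps inc)))
            (pySplitDot inc) = _
        rw [ihl,
            show ∀ (s t : PySem.Set (List String)),
                PySem.Set.diff s t = s.filter (fun x => !t.contains x) from fun _ _ => rfl,
            List.filter_filter]
        have hfull_not : pySplitDot inc ∉
            (PySem.Set.ofList (pre.map pySplitDot)).filter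
              (fun a => !(PySem.Set.ofList (pvProps inc)).contains a
                  && !(pre.flatMap pvProps).contains a) :=
          fun h => hnotfull ((PySem.Set.mem_ofList _ _).mp (List.mem_of_mem_filter h))
        rw [PySem.Set.add_of_not_mem hfull_not, List.map_append, List.map_cons, List.map_nil,
            PySem.Set.ofList_append_singleton,
            PySem.Set.add_of_not_mem (fun hc => hnotfull ((PySem.Set.mem_ofList _ _).mp hc)),
            List.filter_append]
        have hkeep : List.filter (fun x => !((pre ++ [inc]).flatMap pvProps).contains x)
            [pySplitDot inc] = [pySplitDot inc] := by
          have hn : pySplitDot inc ∉ (pre ++ [inc]).flatMap pvProps := by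
            rw [List.flatMap_append]
            simp only [List.mem_append, List.flatMap_cons, List.flatMap_nil, List.append_nil]
            rintro (h | h)
            · exact hnotprops h
            · exact full_not_mem_props inc h
          have hf : ((pre ++ [inc]).flatMap pvProps).contains (pySplitDot inc) = false := by
            rw [← Bool.not_eq_true]
            intro hc
            exact hn (List.contains_iff_mem.mp hc)
          simp only [List.filter_cons, List.filter_nil, hf, Bool.not_false, if_true]
        rw [hkeep]
        congr 1
        apply List.filter_congr
        intro a _
        rw [Bool.eq_iff_iff]
        simp [List.contains_eq_mem, List.flatMap_append, PySem.Set.mem_ofList]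
        tauto

-- B's prefix comprehension, in pvTakes form
theorem alt_prefixes_eq (names : List String) :
    (PySem.List.pyRange 1 (names.length : Int) 1).map (fun i => PySem.List.slice names none (some i))
      = pvTakes names (names.length - 1) := by
  unfold pvTakes
  rw [PySem.List.pyRange_one]
  simp only [List.map_map]
  rw [show (((names.length : Int)) - 1).toNat = names.length - 1 by omega]
  apply List.map_congr_left
  intro k _
  simp only [Function.comp]
  rw [show ((1:Int) + (k:Int)) = ((k+1 : Nat) : Int) by push_cast; ring,
      PySem.List.slice_to _ (by positivity)]
  simp

theorem longest_includes_agree (includes : List String) :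
    longest_includes includes = longest_includes_alt includes := by
  have halt : longest_includes_alt includes
      = (PySem.Set.ofList (includes.map (fun inc => pySplitDot inc))).filter
          (fun x => !((PySem.Set.ofList
              ((PySem.Set.ofList (includes.map (fun inc => pySplitDot inc))).flatMap
                (fun names => (PySem.List.pyRange 1 (names.length : Int) 1).map
                  (fun i => PySem.List.slice names none (some i))))).contains x)) := rfl
  rw [longest_includes_eq_foldl, (pvInv includes).2, halt]
  apply List.filter_congr
  intro x hx
  congr 1
  rw [Bool.eq_iff_iff, List.contains_iff_mem, PySem.Set.contains_iff, PySem.Set.mem_ofList]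
  simp only [List.mem_flatMap, PySem.Set.mem_ofList, List.mem_map, alt_prefixes_eq, pvProps]
  constructor
  · rintro ⟨inc, hinc, hxp⟩
    exact ⟨pySplitDot inc, ⟨inc, hinc, rfl⟩, hxp⟩
  · rintro ⟨names, ⟨inc, hinc, rfl⟩, hxp⟩
    exact ⟨inc, hinc, hxp⟩

-- ===== VERDICT (by name: the statement is the Claim_ definition above) =====
theorem longest_includes_spec : Claim_equal_longest_includes := by
  intro includes _
  unfold Spec_longest_includes
  exact longest_includes_agree includes
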